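-- pv_equiv track=rewrite | github.com/proehr/CoMa | PA0502.py | ist_aequivalenzrelation
-- ===== SOURCE A (Python) =====
-- def aeklasse(n,R):
-- 	alist=[]
-- 	x=len(R)
-- 	for i in range(0,x):
-- 		if n==R[i][0]:
-- 			alist.append(R[i][1])
-- 	alist.sort()
-- 	return alist
--
-- def ist_aequivalenzrelation(n,R):
-- 		a=True
--
-- 		if n==1:
-- 			if 1 in aeklasse(n,R):
-- 				return True
-- 			else:
-- 				return False
--
--
--
-- 		for i in range(1,n+1):
-- 			for j in range(0,len(aeklasse(i,R))):
-- 				for k in range(i+1,n+1):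
-- 					if aeklasse(i,R)[j] in aeklasse(k,R):
-- 						if set(aeklasse(i,R))==set(aeklasse(k,R)):
-- 							a=True
-- 						elif set(aeklasse(i,R))!=set(aeklasse(k,R)):
-- 							return False
-- 		return a
-- ===== SOURCE B (Python) =====
-- def ist_aequivalenzrelation(n, R):
--     if n == 1:
--         return (1, 1) in R
--     classes = [{b for a, b in R if a == i} for i in range(1, n + 1)]
--     seen = {}  # element -> the first class (by index) that contains it
--     for s in classes:
--         for e in s:
--             first = seen.get(e)
--             if first is None:
--                 seen[e] = s
--             elif first != s:
--                 return False
--     return True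
-- ===== Notes on version B (the rewrite author's own statement) =====
-- stated objective: faster
-- what changed: B computes each class once as a set and keeps a dict mapping every element to the first class containing it, so one pass over the classes replaces A's triple nested loop that recomputes and re-sorts aeklasse(i,R) inside every iteration.
import Mathlib
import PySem

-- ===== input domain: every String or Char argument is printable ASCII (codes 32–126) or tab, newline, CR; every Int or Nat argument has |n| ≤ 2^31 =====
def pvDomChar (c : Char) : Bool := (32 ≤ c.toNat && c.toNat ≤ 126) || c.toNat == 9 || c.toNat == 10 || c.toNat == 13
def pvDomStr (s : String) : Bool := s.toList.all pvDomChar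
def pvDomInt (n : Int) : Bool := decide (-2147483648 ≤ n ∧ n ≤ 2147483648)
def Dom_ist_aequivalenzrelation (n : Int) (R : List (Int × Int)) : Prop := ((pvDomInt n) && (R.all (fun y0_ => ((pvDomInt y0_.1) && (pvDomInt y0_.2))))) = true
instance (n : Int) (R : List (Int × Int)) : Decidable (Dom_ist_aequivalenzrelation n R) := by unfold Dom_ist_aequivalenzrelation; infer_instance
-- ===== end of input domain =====

-- B precomputes each class once and keeps a hash map element → first class containing it,
-- replacing A's triple nested loop with its repeated aeklasse recomputations (objective: faster).

-- ===== PORT A =====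
-- aeklasse(n, R): collect second components of pairs with first component n, then sort
def pvAeklasse (n : Int) (R : List (Int × Int)) : List Int :=
  PySem.List.sorted (R.foldl (fun acc p => if n == p.1 then acc ++ [p.2] else acc) []) (fun x => x) false

-- set(x) == set(y)
def pvSetEqA (x y : List Int) : Bool := PySem.Set.equal (PySem.Set.ofList x) (PySem.Set.ofList y)

-- innermost loop 'for k in range(i+1, n+1)'; returns false exactly when A executes 'return False'
def pvLoopK (ci : List Int) (e : Int) (R : List (Int × Int)) : List Int → Bool
  | [] => true
  | k :: ks =>
    if (pvAeklasse k R).contains e then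
      if pvSetEqA ci (pvAeklasse k R) then pvLoopK ci e R ks else false
    else pvLoopK ci e R ks

-- middle loop 'for j in range(0, len(aeklasse(i,R)))' iterating the elements aeklasse(i,R)[j]
def pvLoopJ (i : Int) (n : Int) (R : List (Int × Int)) : List Int → Bool
  | [] => true
  | e :: es =>
    if pvLoopK (pvAeklasse i R) e R (PySem.List.pyRange (i + 1) (n + 1) 1) then pvLoopJ i n R es
    else false

-- outer loop 'for i in range(1, n+1)'
def pvLoopI (n : Int) (R : List (Int × Int)) : List Int → Bool
  | [] => true
  | i :: is_ => if pvLoopJ i n R (pvAeklasse i R) then pvLoopI n R is_ else false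

def ist_aequivalenzrelation (n : Int) (R : List (Int × Int)) : Bool :=
  if n == 1 then (pvAeklasse n R).contains 1
  else pvLoopI n R (PySem.List.pyRange 1 (n + 1) 1)

-- ===== PORT B =====
-- {b for (a, b) in R if a == i}
def pvClassOf (i : Int) (R : List (Int × Int)) : PySem.Set Int :=
  PySem.Set.ofList (R.filterMap (fun p => if p.1 == i then some p.2 else none))

-- 'for e in s' body: look e up in seen, insert the class if new, fail if a different class is known
def pvInnerB (s : PySem.Set Int) (seen : PySem.Dict Int (PySem.Set Int)) :
    List Int → Option (PySem.Dict Int (PySem.Set Int))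
  | [] => some seen
  | e :: es =>
    match seen.get? e with
    | none => pvInnerB s (seen.insert e s) es
    | some first => if PySem.Set.equal first s then pvInnerB s seen es else none

-- 'for s in classes'
def pvOuterB (seen : PySem.Dict Int (PySem.Set Int)) : List (PySem.Set Int) → Bool
  | [] => true
  | s :: ss =>
    match pvInnerB s seen s with
    | none => false
    | some seen' => pvOuterB seen' ss

def ist_aequivalenzrelation_alt (n : Int) (R : List (Int × Int)) : Bool :=
  if n == 1 then R.contains (1, 1)
  else
    pvOuterB PySem.Dict.empty ((PySem.List.pyRange 1 (n + 1) 1).map (fun i => pvClassOf i R))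

-- ===== PRECONDITION & SPEC =====
def Spec_ist_aequivalenzrelation (n : Int) (R : List (Int × Int)) (out : Bool) : Prop := out = ist_aequivalenzrelation_alt n R
instance (n : Int) (R : List (Int × Int)) (out : Bool) : Decidable (Spec_ist_aequivalenzrelation n R out) := by unfold Spec_ist_aequivalenzrelation; infer_instance

-- ===== CLAIM (what is proved, stated in full; the proofs are below) =====
def Claim_equal_ist_aequivalenzrelation : Prop := ∀ (n : Int) (R : List (Int × Int)), Dom_ist_aequivalenzrelation n R → Spec_ist_aequivalenzrelation n R (ist_aequivalenzrelation n R)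

-- ===== LEMMAS AND PROOFS =====

-- first class in the list containing e (B's 'seen' dict realises this map)
def pvFirst (l : List (PySem.Set Int)) (e : Int) : Option (PySem.Set Int) :=
  l.find? (fun s => s.contains e)

theorem pv_mem_aeklasse (i e : Int) (R : List (Int × Int)) :
    e ∈ pvAeklasse i R ↔ ∃ p ∈ R, p.1 = i ∧ p.2 = e := by
  unfold pvAeklasse
  rw [PySem.List.mem_sorted, PySem.List.foldl_append_if]
  simp only [List.nil_append, List.mem_map, List.mem_filter, beq_iff_eq]
  constructor
  · rintro ⟨p, ⟨hp, h1⟩, h2⟩; exact ⟨p, hp, h1.symm, h2⟩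
  · rintro ⟨p, hp, h1, h2⟩; exact ⟨p, ⟨hp, h1.symm⟩, h2⟩

theorem pv_mem_classOf (i e : Int) (R : List (Int × Int)) :
    e ∈ pvClassOf i R ↔ ∃ p ∈ R, p.1 = i ∧ p.2 = e := by
  simp only [pvClassOf, PySem.Set.mem_ofList, List.mem_filterMap]
  constructor
  · rintro ⟨p, hp, h⟩
    by_cases h1 : p.1 = i
    · simp [h1] at h; exact ⟨p, hp, h1, h⟩
    · simp [h1] at h
  · rintro ⟨p, hp, h1, h2⟩; exact ⟨p, hp, by simp [h1, h2]⟩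

theorem pv_setEqA_iff (i k : Int) (R : List (Int × Int)) :
    pvSetEqA (pvAeklasse i R) (pvAeklasse k R) = true ↔
      PySem.Set.equal (pvClassOf i R) (pvClassOf k R) = true := by
  have hi : ∀ x, x ∈ pvAeklasse i R ↔ x ∈ pvClassOf i R :=
    fun x => (pv_mem_aeklasse i x R).trans (pv_mem_classOf i x R).symm
  have hk : ∀ x, x ∈ pvAeklasse k R ↔ x ∈ pvClassOf k R :=
    fun x => (pv_mem_aeklasse k x R).trans (pv_mem_classOf k x R).symm
  simp only [pvSetEqA, PySem.Set.equal_iff, PySem.Set.mem_ofList]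
  constructor
  · intro h x; rw [← hi, ← hk]; exact h x
  · intro h x; rw [hi, hk]; exact h x

theorem pv_loopK_iff (ci : List Int) (e : Int) (R : List (Int × Int)) (ks : List Int) :
    pvLoopK ci e R ks = true ↔
      ∀ k ∈ ks, (pvAeklasse k R).contains e = true → pvSetEqA ci (pvAeklasse k R) = true := by
  induction ks with
  | nil => simp [pvLoopK]
  | cons k ks ih =>
    simp only [pvLoopK, List.forall_mem_cons]
    split_ifs with h1 h2
    · rw [ih]; simp [h2]
    · constructor
      · intro h; cases h
      · rintro ⟨hc, -⟩; exact absurd (hc h1) h2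
    · rw [ih]
      constructor
      · intro h; exact ⟨fun hc => absurd hc h1, h⟩
      · rintro ⟨-, h⟩; exact h

theorem pv_loopJ_iff (i n : Int) (R : List (Int × Int)) (es : List Int) :
    pvLoopJ i n R es = true ↔
      ∀ e ∈ es, pvLoopK (pvAeklasse i R) e R (PySem.List.pyRange (i + 1) (n + 1) 1) = true := by
  induction es with
  | nil => simp [pvLoopJ]
  | cons x es ih =>
    simp only [pvLoopJ, List.forall_mem_cons]
    split_ifs with h1 <;> simp [ih, h1]

theorem pv_loopI_iff (n : Int) (R : List (Int × Int)) (is_ : List Int) :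
    pvLoopI n R is_ = true ↔ ∀ i ∈ is_, pvLoopJ i n R (pvAeklasse i R) = true := by
  induction is_ with
  | nil => simp [pvLoopI]
  | cons i is_ ih =>
    simp only [pvLoopI, List.forall_mem_cons]
    split_ifs with h1 <;> simp [ih, h1]

theorem pv_innerB_spec (s : PySem.Set Int) (es : List Int) (prev : List (PySem.Set Int))
    (seen : PySem.Dict Int (PySem.Set Int)) (hnd : es.Nodup) (hsub : ∀ e ∈ es, e ∈ s)
    (hinv : ∀ e : Int, seen.get? e =
      ((pvFirst prev e).or (if e ∈ s ∧ e ∉ es then some s else none))) :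
    (pvInnerB s seen es = none ↔
      ∃ e ∈ es, ∃ t, pvFirst prev e = some t ∧ PySem.Set.equal t s = false) ∧
    (∀ seen', pvInnerB s seen es = some seen' →
      ∀ e, seen'.get? e = pvFirst (prev ++ [s]) e) := by
  induction es generalizing seen with
  | nil =>
    refine ⟨by simp [pvInnerB], ?_⟩
    intro seen' h e
    simp only [pvInnerB, Option.some.injEq] at h
    subst h
    have hx := hinv e
    simp only [List.not_mem_nil, not_false_iff, and_true] at hx
    rw [hx, pvFirst, pvFirst, List.find?_append]
    have hsing : (if e ∈ s then some s else none) = List.find? (fun t => t.contains e) [s] := by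
      by_cases hm : e ∈ s
      · rw [if_pos hm, List.find?_cons_of_pos (by simpa using hm)]
      · rw [if_neg hm, List.find?_cons_of_neg (by simpa using hm), List.find?_nil]
    rw [← hsing]
  | cons e es ih =>
    have hnd' : es.Nodup := (List.nodup_cons.mp hnd).2
    have hne : e ∉ es := (List.nodup_cons.mp hnd).1
    have he_s : e ∈ s := hsub e (List.mem_cons_self)
    have hgete : seen.get? e = pvFirst prev e := by
      rw [hinv e]
      simp only [List.mem_cons, true_or, not_true_eq_false, and_false, if_false, Option.or_none]
    simp only [pvInnerB]
    cases hget : seen.get? e with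
    | none =>
      dsimp only
      have hfp : pvFirst prev e = none := by rw [← hgete, hget]
      have hinv' : ∀ e' : Int, (seen.insert e s).get? e' =
          ((pvFirst prev e').or (if e' ∈ s ∧ e' ∉ es then some s else none)) := by
        intro e'
        rw [PySem.Dict.get?_insert]
        by_cases h' : e' = e
        · subst h'; rw [if_pos rfl, hfp]
          simp [he_s, hne]
        · rw [if_neg h', hinv e']
          have hif : (if e' ∈ s ∧ e' ∉ e :: es then some s else (none : Option (PySem.Set Int))) =
              (if e' ∈ s ∧ e' ∉ es then some s else none) :=
            if_congr (by simp [List.mem_cons, h']) rfl rfl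
          rw [hif]
      obtain ⟨ih1, ih2⟩ := ih (seen.insert e s) hnd' (fun x hx => hsub x (List.mem_cons_of_mem _ hx)) hinv'
      refine ⟨?_, ih2⟩
      rw [ih1, List.exists_mem_cons_iff]
      simp [hfp]
    | some first =>
      dsimp only
      have hfp : pvFirst prev e = some first := by rw [← hgete, hget]
      cases heq : PySem.Set.equal first s with
      | false =>
        rw [if_neg (by simp)]
        exact ⟨⟨fun _ => ⟨e, List.mem_cons_self, first, hfp, heq⟩, fun _ => rfl⟩,
          fun seen' h => by cases h⟩
      | true =>
        rw [if_pos rfl]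
        have hinv' : ∀ e' : Int, seen.get? e' =
            ((pvFirst prev e').or (if e' ∈ s ∧ e' ∉ es then some s else none)) := by
          intro e'
          by_cases h' : e' = e
          · subst h'; rw [hget, hfp, Option.some_or]
          · rw [hinv e']
            have hif : (if e' ∈ s ∧ e' ∉ e :: es then some s else (none : Option (PySem.Set Int))) =
                (if e' ∈ s ∧ e' ∉ es then some s else none) :=
              if_congr (by simp [List.mem_cons, h']) rfl rfl
            rw [hif]
        obtain ⟨ih1, ih2⟩ := ih seen hnd' (fun x hx => hsub x (List.mem_cons_of_mem _ hx)) hinv'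
        refine ⟨?_, ih2⟩
        rw [ih1, List.exists_mem_cons_iff]
        have : ¬ (∃ t, pvFirst prev e = some t ∧ PySem.Set.equal t s = false) := by
          rintro ⟨t, ht, htf⟩
          rw [hfp, Option.some.injEq] at ht
          rw [← ht, heq] at htf; cases htf
        simp only [this, false_or]

theorem pv_outerB_spec (cs : List (PySem.Set Int)) (prev : List (PySem.Set Int))
    (seen : PySem.Dict Int (PySem.Set Int)) (hnd : ∀ s ∈ cs, s.Nodup)
    (hinv : ∀ e : Int, seen.get? e = pvFirst prev e) :
    (pvOuterB seen cs = true ↔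
      ∀ l s r, cs = l ++ s :: r → ∀ e : Int, e ∈ s → ∀ t,
        pvFirst (prev ++ l) e = some t → PySem.Set.equal t s = true) := by
  induction cs generalizing prev seen with
  | nil =>
    simp only [pvOuterB, true_iff]
    intro l s r h
    exact absurd h (by cases l <;> simp)
  | cons s ss ih =>
    have hsnd : s.Nodup := hnd s List.mem_cons_self
    obtain ⟨i1, i2⟩ := pv_innerB_spec s s prev seen hsnd (fun _ h => h)
      (by intro e; rw [hinv e]; simp)
    simp only [pvOuterB]
    cases hin : pvInnerB s seen s with
    | none =>
      obtain ⟨e, he, t, ht, htf⟩ := i1.mp hin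
      constructor
      · intro h; cases h
      · intro h; exfalso
        have := h [] s ss rfl e he t (by rw [List.append_nil]; exact ht)
        rw [this] at htf; cases htf
    | some seen' =>
      have hnone : ¬ ∃ e ∈ s, ∃ t, pvFirst prev e = some t ∧ PySem.Set.equal t s = false := by
        rw [← i1, hin]; simp
      rw [ih (prev ++ [s]) seen' (fun t ht => hnd t (List.mem_cons_of_mem _ ht)) (i2 seen' hin)]
      constructor
      · intro h l s' r hdec e he t ht
        rcases l with _ | ⟨x, l⟩
        · simp only [List.nil_append, List.cons.injEq] at hdec
          obtain ⟨h1, h2⟩ := hdec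
          subst h1
          rw [List.append_nil] at ht
          by_contra hnt
          exact hnone ⟨e, he, t, ht, by cases hq : PySem.Set.equal t s with
            | true => exact absurd hq hnt
            | false => rfl⟩
        · simp only [List.cons_append, List.cons.injEq] at hdec
          obtain ⟨h1, h2⟩ := hdec
          subst h1
          exact h l s' r h2 e he t (by simpa using ht)
      · intro h l s' r hdec e he t ht
        exact h (s :: l) s' r (by rw [hdec, List.cons_append]) e he t (by simpa using ht)

theorem pv_main_iff (n : Int) (R : List (Int × Int)) :
    pvLoopI n R (PySem.List.pyRange 1 (n + 1) 1) = true ↔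
      pvOuterB PySem.Dict.empty ((PySem.List.pyRange 1 (n + 1) 1).map (fun i => pvClassOf i R)) = true := by
  rw [pv_loopI_iff]
  rw [pv_outerB_spec ((PySem.List.pyRange 1 (n + 1) 1).map (fun i => pvClassOf i R)) [] PySem.Dict.empty
    (by rintro s hs; obtain ⟨i, -, rfl⟩ := List.mem_map.mp hs; exact PySem.Set.nodup_ofList _)
    (by intro e; rw [PySem.Dict.get?_empty]; rfl)]
  constructor
  · -- A's triple loop implies B's first-class check
    intro hA l s r hdec e he t ht
    rw [List.nil_append] at ht
    obtain ⟨u, v, hext, hu, hv⟩ := List.map_eq_append_iff.mp hdec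
    obtain ⟨k, v', hv', hs, hr⟩ := List.map_eq_cons_iff.mp hv
    have htl : t ∈ l := List.mem_of_find?_eq_some ht
    rw [← hu] at htl
    obtain ⟨i, hiu, hit⟩ := List.mem_map.mp htl
    have het : e ∈ t := by simpa using List.find?_some ht
    have hrng : PySem.List.pyRange 1 (n + 1) 1 = u ++ k :: v' := by rw [hext, hv']
    have hpw := PySem.List.pairwise_lt_pyRange_one (a := 1) (b := n + 1)
    rw [hrng] at hpw
    have hik : i < k := (List.pairwise_append.mp hpw).2.2 i hiu k List.mem_cons_self
    have hi_rng : i ∈ PySem.List.pyRange 1 (n + 1) 1 := by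
      rw [hrng]; exact List.mem_append_left _ hiu
    have hk_rng : k ∈ PySem.List.pyRange 1 (n + 1) 1 := by
      rw [hrng]; exact List.mem_append_right _ List.mem_cons_self
    have hkb := (PySem.List.mem_pyRange_one).mp hk_rng
    have heA : e ∈ pvAeklasse i R :=
      (pv_mem_aeklasse i e R).mpr ((pv_mem_classOf i e R).mp (by rw [hit]; exact het))
    have hkA : e ∈ pvAeklasse k R :=
      (pv_mem_aeklasse k e R).mpr ((pv_mem_classOf k e R).mp (by rw [hs]; exact he))
    have h2 := (pv_loopK_iff (pvAeklasse i R) e R _).mp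
      ((pv_loopJ_iff i n R _).mp (hA i hi_rng) e heA) k
      ((PySem.List.mem_pyRange_one).mpr ⟨by omega, by omega⟩) (by simpa using hkA)
    rw [pv_setEqA_iff, hit, hs] at h2
    exact h2
  · -- B's first-class check implies A's triple loop
    intro hB i hi
    rw [pv_loopJ_iff]
    intro e heA
    rw [pv_loopK_iff]
    intro k hk hkcont
    have hib := (PySem.List.mem_pyRange_one).mp hi
    have hkb := (PySem.List.mem_pyRange_one).mp hk
    have hk_rng : k ∈ PySem.List.pyRange 1 (n + 1) 1 :=
      (PySem.List.mem_pyRange_one).mpr ⟨by omega, by omega⟩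
    have heCi : e ∈ pvClassOf i R := (pv_mem_classOf i e R).mpr ((pv_mem_aeklasse i e R).mp heA)
    have heCk : e ∈ pvClassOf k R := (pv_mem_classOf k e R).mpr
      ((pv_mem_aeklasse k e R).mp (by simpa using hkcont))
    obtain ⟨t0, ht0⟩ : ∃ t0, pvFirst ((PySem.List.pyRange 1 (n + 1) 1).map (fun i => pvClassOf i R)) e = some t0 := by
      refine Option.isSome_iff_exists.mp (List.find?_isSome.mpr ⟨pvClassOf i R, List.mem_map.mpr ⟨i, hi, rfl⟩, by simpa using heCi⟩)
    have key : ∀ s ∈ (PySem.List.pyRange 1 (n + 1) 1).map (fun i => pvClassOf i R), e ∈ s →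
        PySem.Set.equal t0 s = true := by
      intro s hsmem hes
      obtain ⟨l, r, hdec⟩ := List.append_of_mem hsmem
      cases hfl : pvFirst l e with
      | some t =>
        have hts : pvFirst ((PySem.List.pyRange 1 (n + 1) 1).map (fun i => pvClassOf i R)) e = some t := by
          rw [hdec]; unfold pvFirst; rw [List.find?_append]
          rw [show l.find? (fun s => s.contains e) = some t from hfl]; rfl
        have ht0t : t0 = t := by rw [hts] at ht0; exact (Option.some_inj.mp ht0).symm
        rw [ht0t]
        exact hB l s r hdec e hes t (by simpa using hfl)
      | none =>
        have hts : pvFirst ((PySem.List.pyRange 1 (n + 1) 1).map (fun i => pvClassOf i R)) e = some s := by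
          rw [hdec]; unfold pvFirst; rw [List.find?_append]
          rw [show l.find? (fun s => s.contains e) = none from hfl]
          rw [List.find?_cons_of_pos (by simpa using hes)]; rfl
        have hts0 : t0 = s := by rw [hts] at ht0; exact (Option.some_inj.mp ht0).symm
        rw [hts0, PySem.Set.equal_iff]
        intro x
        exact Iff.rfl
    have h1 := key (pvClassOf i R) (List.mem_map.mpr ⟨i, hi, rfl⟩) heCi
    have h2 := key (pvClassOf k R) (List.mem_map.mpr ⟨k, hk_rng, rfl⟩) heCk
    rw [pv_setEqA_iff, PySem.Set.equal_iff]
    rw [PySem.Set.equal_iff] at h1 h2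
    intro x
    exact ((h1 x).symm).trans (h2 x)

-- ===== VERDICT (by name: the statement is the Claim_ definition above) =====
theorem ist_aequivalenzrelation_spec : Claim_equal_ist_aequivalenzrelation := by
  intro n R _
  unfold Spec_ist_aequivalenzrelation ist_aequivalenzrelation ist_aequivalenzrelation_alt
  have hbool : ∀ (a b : Bool), (a = true ↔ b = true) → a = b := by decide
  by_cases h1 : n = 1
  · subst h1
    rw [if_pos (by decide), if_pos (by decide)]
    apply hbool
    constructor
    · intro h
      obtain ⟨⟨a, b⟩, hp, ha, hb⟩ := (pv_mem_aeklasse 1 1 R).mp (by simpa using h)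
      simp only at ha hb
      subst ha; subst hb
      simpa using hp
    · intro h
      have : (1 : Int) ∈ pvAeklasse 1 R :=
        (pv_mem_aeklasse 1 1 R).mpr ⟨(1, 1), by simpa using h, rfl, rfl⟩
      simpa using this
  · rw [if_neg (by simpa using h1), if_neg (by simpa using h1)]
    exact hbool _ _ (pv_main_iff n R)
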